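-- pv_equiv track=rewrite | github.com/macaron-software/software-factory | _SOFTWARE_FACTORY/platform/confluence/converter.py | _wrap_tables
-- ===== SOURCE A (Python) =====
-- def _wrap_tables(xhtml: str) -> str:
--     """Wrap consecutive <tr> into <table>."""
--     lines = xhtml.split("\n")
--     out = []
--     in_table = False
--     for line in lines:
--         if "<tr>" in line and not in_table:
--             out.append("<table><tbody>")
--             in_table = True
--         elif "<tr>" not in line and in_table:
--             out.append("</tbody></table>")
--             in_table = False
--         out.append(line)
--     if in_table:
--         out.append("</tbody></table>")
--     return "\n".join(out)
-- ===== SOURCE B (Python) =====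
-- def _wrap_tables(xhtml: str) -> str:
--     """Wrap consecutive <tr> into <table> by grouping runs of <tr> lines."""
--     lines = xhtml.split("\n")
--     out = []
--     i, n = 0, len(lines)
--     while i < n:
--         if "<tr>" in lines[i]:
--             j = i
--             while j < n and "<tr>" in lines[j]:
--                 j += 1
--             out.append("<table><tbody>")
--             out.extend(lines[i:j])
--             out.append("</tbody></table>")
--             i = j
--         else:
--             out.append(lines[i])
--             i += 1
--     return "\n".join(out)
-- ===== Notes on version B (the rewrite author's own statement) =====
-- stated objective: alternative
-- what changed: Replaces A's stateful in_table flag and enter/leave branches by run-grouping: an inner scan finds each maximal run of <tr> lines and wraps it in one step.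
import Mathlib
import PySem

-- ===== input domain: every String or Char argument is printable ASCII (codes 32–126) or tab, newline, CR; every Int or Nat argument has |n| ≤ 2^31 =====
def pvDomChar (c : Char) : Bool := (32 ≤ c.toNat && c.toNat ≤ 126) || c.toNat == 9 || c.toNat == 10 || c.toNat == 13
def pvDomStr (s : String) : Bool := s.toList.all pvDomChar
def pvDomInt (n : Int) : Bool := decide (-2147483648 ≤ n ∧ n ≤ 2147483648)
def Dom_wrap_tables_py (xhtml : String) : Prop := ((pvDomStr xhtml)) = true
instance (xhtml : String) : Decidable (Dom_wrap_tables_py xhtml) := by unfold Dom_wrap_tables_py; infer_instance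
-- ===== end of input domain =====

-- B replaces A's stateful in_table flag by direct run-grouping of consecutive <tr> lines (alternative decomposition, same cost).

-- ===== PORT A =====
-- A's loop body: the three branches of the for-loop over lines, state = (out, in_table)
def wrapStepA (st : List String × Bool) (line : String) : List String × Bool :=
  if PySem.Str.isIn "<tr>" line && !st.2 then
    (st.1 ++ ["<table><tbody>"] ++ [line], true)
  else if !(PySem.Str.isIn "<tr>" line) && st.2 then
    (st.1 ++ ["</tbody></table>"] ++ [line], false)
  else
    (st.1 ++ [line], st.2)

def wrap_tables_py (xhtml : String) : String :=
  let lines := (PySem.Str.split? xhtml "\n").getD []   -- sep "\n" ≠ "", so split? is always some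
  let st := lines.foldl wrapStepA ([], false)
  let out := if st.2 then st.1 ++ ["</tbody></table>"] else st.1
  PySem.Str.join "\n" out

-- ===== PORT B =====
def isTrB (line : String) : Bool := PySem.Str.isIn "<tr>" line

-- B's outer loop; the inner scan computing lines[i:j] / advancing i to j is takeWhile / dropWhile
def wrapRecB : List String → List String
  | [] => []
  | l :: rest =>
    if isTrB l then
      ["<table><tbody>"] ++ ((l :: rest).takeWhile isTrB)
        ++ ["</tbody></table>"] ++ wrapRecB ((l :: rest).dropWhile isTrB)
    else
      l :: wrapRecB rest
termination_by lines => lines.length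
decreasing_by
  · simp_all
    exact List.length_dropWhile_le _ _
  · simp

def wrap_tables_py_alt (xhtml : String) : String :=
  PySem.Str.join "\n" (wrapRecB ((PySem.Str.split? xhtml "\n").getD []))

-- ===== PRECONDITION & SPEC =====
def Spec_wrap_tables_py (xhtml : String) (out : String) : Prop := out = wrap_tables_py_alt xhtml
instance (xhtml : String) (out : String) : Decidable (Spec_wrap_tables_py xhtml out) := by unfold Spec_wrap_tables_py; infer_instance

-- ===== CLAIM (what is proved, stated in full; the proofs are below) =====
def Claim_equal_wrap_tables_py : Prop := ∀ (xhtml : String), Dom_wrap_tables_py xhtml → Spec_wrap_tables_py xhtml (wrap_tables_py xhtml)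

-- ===== LEMMAS AND PROOFS =====

-- A's loop result plus the final close marker, as a function of the incoming flag
def finishA (lines : List String) (b : Bool) : List String :=
  let st := lines.foldl wrapStepA ([], b)
  if st.2 then st.1 ++ ["</tbody></table>"] else st.1

-- A's fold: the accumulated output splits off
theorem foldl_wrapStepA_acc (lines : List String) (out : List String) (b : Bool) :
    lines.foldl wrapStepA (out, b)
      = (out ++ (lines.foldl wrapStepA ([], b)).1, (lines.foldl wrapStepA ([], b)).2) := by
  induction lines generalizing out b with
  | nil => simp
  | cons l rest ih =>
    simp only [List.foldl_cons]
    have hstep : ∀ o : List String,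
        wrapStepA (o, b) l = (o ++ (wrapStepA ([], b) l).1, (wrapStepA ([], b) l).2) := by
      intro o; unfold wrapStepA; split_ifs with h1 h2 <;> simp_all
    rw [hstep out, hstep []]
    rw [ih, ih ([] ++ (wrapStepA ([], b) l).1)]
    simp

theorem finishA_cons (l : String) (rest : List String) (b : Bool) :
    finishA (l :: rest) b
      = (wrapStepA ([], b) l).1 ++ finishA rest (wrapStepA ([], b) l).2 := by
  unfold finishA
  simp only [List.foldl_cons]
  have : wrapStepA (([] : List String), b) l
      = ((wrapStepA ([], b) l).1, (wrapStepA ([], b) l).2) := rfl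
  rw [this, foldl_wrapStepA_acc rest (wrapStepA ([], b) l).1 (wrapStepA ([], b) l).2]
  split_ifs <;> simp

theorem finishA_eq (lines : List String) : ∀ b : Bool,
    finishA lines b
      = if b then
          lines.takeWhile isTrB ++ ["</tbody></table>"] ++ wrapRecB (lines.dropWhile isTrB)
        else wrapRecB lines := by
  induction lines with
  | nil => intro b; cases b <;> simp [finishA, wrapRecB]
  | cons l rest ih =>
    intro b
    rw [finishA_cons]
    by_cases h : isTrB l = true
    · have hb0 : wrapStepA (([] : List String), false) l = (["<table><tbody>", l], true) := by
        unfold wrapStepA; simp [isTrB] at h; simp [h]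
      have hb1 : wrapStepA (([] : List String), true) l = ([l], true) := by
        unfold wrapStepA; simp [isTrB] at h; simp [h]
      cases b with
      | false =>
        rw [hb0]
        simp only [ih true, if_neg (Bool.false_ne_true)]
        rw [wrapRecB, if_pos h]
        simp [h]
      | true =>
        rw [hb1]
        simp only [ih true]
        simp [h]
    · have hb0 : wrapStepA (([] : List String), false) l = ([l], false) := by
        unfold wrapStepA; simp [isTrB] at h; simp [h]
      have hb1 : wrapStepA (([] : List String), true) l = (["</tbody></table>", l], false) := by
        unfold wrapStepA; simp [isTrB] at h; simp [h]
      have hw : wrapRecB (l :: rest) = l :: wrapRecB rest := by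
        rw [wrapRecB, if_neg (by simp [h])]
      cases b with
      | false =>
        rw [hb0]
        simp only [ih false, if_neg (Bool.false_ne_true)]
        rw [hw]
        simp
      | true =>
        rw [hb1]
        simp only [ih false, if_neg (Bool.false_ne_true)]
        rw [hw]
        simp [h]
        exact hw.symm

-- ===== VERDICT (by name: the statement is the Claim_ definition above) =====
theorem wrap_tables_py_spec : Claim_equal_wrap_tables_py := by
  intro xhtml _
  unfold Spec_wrap_tables_py wrap_tables_py wrap_tables_py_alt
  have := finishA_eq ((PySem.Str.split? xhtml "\n").getD []) false
  simp only [finishA, if_neg (Bool.false_ne_true)] at this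
  simp only [this]
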